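-- pv_equiv track=rewrite | github.com/thefirstofthe300/python-playground | interview_practice/numero_wat/numeronym.py | get_numeronym_length
-- ===== SOURCE A (Python) =====
-- def get_numeronym_length(numeronym):
--   length = 0
--   number_pos = 0
--   for x in range(len(numeronym) - 1, -1, -1):
--     if numeronym[x].isalpha():
--       length += 1
--     elif numeronym[x].isdigit():
--       length += int(numeronym[x]) * (10 ** number_pos)
--       number_pos += 1
--   return length
-- ===== SOURCE B (Python) =====
-- def get_numeronym_length(numeronym):
--     letters = sum(c.isalpha() for c in numeronym)
--     value = 0
--     for c in numeronym:
--         if c.isdigit():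
--             value = value * 10 + int(c)
--     return letters + value
-- ===== Notes on version B (the rewrite author's own statement) =====
-- stated objective: simpler
-- what changed: Replaces A's backward index loop that assembles the number with an explicit running place exponent (int(c) * 10**number_pos) by a plain forward pass: count alphabetic characters with sum() and accumulate the digit value by forward Horner (value = value*10 + int(c)), no indexing, no reversal, no exponentiation.
import Mathlib
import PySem

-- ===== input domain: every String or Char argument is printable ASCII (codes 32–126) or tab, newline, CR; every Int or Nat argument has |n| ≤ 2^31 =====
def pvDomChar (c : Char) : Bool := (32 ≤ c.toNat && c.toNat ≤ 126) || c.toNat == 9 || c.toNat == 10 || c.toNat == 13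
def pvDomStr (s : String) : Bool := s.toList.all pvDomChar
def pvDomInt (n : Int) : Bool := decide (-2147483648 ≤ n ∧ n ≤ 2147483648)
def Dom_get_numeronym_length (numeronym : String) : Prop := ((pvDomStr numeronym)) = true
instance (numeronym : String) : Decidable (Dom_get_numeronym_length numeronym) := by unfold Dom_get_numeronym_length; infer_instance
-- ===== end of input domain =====

-- B replaces A's backward indexed loop with a running place exponent by a forward pass:
-- an isalpha count plus a forward Horner accumulation of the digit value (simpler, no indexing).

-- ===== PORT A =====
-- reverse loop over indices; state (length, number_pos); number_pos is always ≥ 0, kept as Nat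
def get_numeronym_length (numeronym : String) : Int :=
  (((PySem.List.pyRange (PySem.Str.len numeronym - 1) (-1) (-1)).foldl
    (fun (st : Int × Nat) x =>
      match PySem.Str.pyGet? numeronym x with
      | some c =>
        if PySem.Chars.isalpha c then (st.1 + 1, st.2)
        else if PySem.Chars.isdigit c then
          -- int(numeronym[x]): always a digit char here, so ofChars? is some; getD 0 unreachable
          (st.1 + (PySem.Int.ofChars? [c]).getD 0 * 10 ^ st.2, st.2 + 1)
        else st
      | none => st)   -- unreachable: every x in range(len-1, -1, -1) is a valid index
    (0, 0)) : Int × Nat).1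

-- ===== PORT B =====
def get_numeronym_length_alt (numeronym : String) : Int :=
  let cs := numeronym.toList
  let letters : Int := (cs.map (fun c => if PySem.Chars.isalpha c then (1 : Int) else 0)).sum
  let value : Int := cs.foldl
    (fun v c => if PySem.Chars.isdigit c then v * 10 + (PySem.Int.ofChars? [c]).getD 0 else v) 0
  letters + value

-- ===== PRECONDITION & SPEC =====
def Spec_get_numeronym_length (numeronym : String) (out : Int) : Prop := out = get_numeronym_length_alt numeronym
instance (numeronym : String) (out : Int) : Decidable (Spec_get_numeronym_length numeronym out) := by unfold Spec_get_numeronym_length; infer_instance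

-- ===== CLAIM (what is proved, stated in full; the proofs are below) =====
def Claim_equal_get_numeronym_length : Prop := ∀ (numeronym : String), Dom_get_numeronym_length numeronym → Spec_get_numeronym_length numeronym (get_numeronym_length numeronym)

-- ===== LEMMAS AND PROOFS =====

-- A's loop body, on the character fetched
def pvStepA (st : Int × Nat) (c : Char) : Int × Nat :=
  if PySem.Chars.isalpha c then (st.1 + 1, st.2)
  else if PySem.Chars.isdigit c then
    (st.1 + (PySem.Int.ofChars? [c]).getD 0 * 10 ^ st.2, st.2 + 1)
  else st

-- B's digit-accumulation body
def pvStepB (v : Int) (c : Char) : Int :=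
  if PySem.Chars.isdigit c then v * 10 + (PySem.Int.ofChars? [c]).getD 0 else v

def pvLetters (cs : List Char) : Int :=
  (cs.map (fun c => if PySem.Chars.isalpha c then (1 : Int) else 0)).sum

def pvValue (cs : List Char) : Int := cs.foldl pvStepB 0

-- a character in '0'..'9' is not alphabetic
lemma pv_digit_not_alpha (c : Char) (h : PySem.Chars.isdigit c = true) :
    PySem.Chars.isalpha c = false := by
  simp [PySem.Chars.isdigit, Char.le_def, UInt32.le_iff_toNat_le] at h
  simp [PySem.Chars.isalpha, PySem.Chars.isupper, PySem.Chars.islower, Char.le_def,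
    UInt32.le_iff_toNat_le]
  omega

-- Horner with a shifted start
lemma pv_horner_shift (cs : List Char) (v0 : Int) :
    cs.foldl pvStepB v0 = v0 * 10 ^ (cs.countP PySem.Chars.isdigit) + pvValue cs := by
  induction cs generalizing v0 with
  | nil => simp [pvValue]
  | cons c cs ih =>
    by_cases hd : PySem.Chars.isdigit c = true
    · have hstep : ∀ v : Int, pvStepB v c = v * 10 + (PySem.Int.ofChars? [c]).getD 0 := by
        intro v; simp [pvStepB, hd]
      simp only [pvValue, List.foldl_cons, hstep, List.countP_cons, hd, if_pos]
      rw [ih (v0 * 10 + (PySem.Int.ofChars? [c]).getD 0),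
          ih ((0 : Int) * 10 + (PySem.Int.ofChars? [c]).getD 0)]
      simp only [pvValue, pow_succ]
      ring
    · have hstep : ∀ v : Int, pvStepB v c = v := by intro v; simp [pvStepB, hd]
      simp only [pvValue, List.foldl_cons, hstep, List.countP_cons]
      rw [ih v0, ih 0]
      simp [hd, pvValue]

-- the backward accumulation, read as a foldr, computes (letters + value, digit count)
lemma pv_foldr_stepA (cs : List Char) :
    cs.foldr (fun c st => pvStepA st c) ((0 : Int), (0 : Nat))
      = (pvLetters cs + pvValue cs, cs.countP PySem.Chars.isdigit) := by
  induction cs with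
  | nil => simp [pvLetters, pvValue]
  | cons c cs ih =>
    simp only [List.foldr_cons, ih]
    have hval : ∀ (_ : PySem.Chars.isdigit c = true),
        pvValue (c :: cs) = ((PySem.Int.ofChars? [c]).getD 0) *
          10 ^ (cs.countP PySem.Chars.isdigit) + pvValue cs := by
      intro hd
      have h0 : pvStepB 0 c = (PySem.Int.ofChars? [c]).getD 0 := by simp [pvStepB, hd]
      simp only [pvValue, List.foldl_cons, h0]
      rw [pv_horner_shift cs]
      rfl
    by_cases ha : PySem.Chars.isalpha c = true
    · have hd : PySem.Chars.isdigit c = false := by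
        by_contra h
        have := pv_digit_not_alpha c (by simpa using h)
        simp [this] at ha
      have hv : pvValue (c :: cs) = pvValue cs := by
        have h0 : pvStepB 0 c = 0 := by simp [pvStepB, hd]
        simp [pvValue, List.foldl_cons, h0]
      simp [pvStepA, ha, hd, pvLetters, hv]
      ring
    · by_cases hd : PySem.Chars.isdigit c = true
      · simp [pvStepA, ha, hd, pvLetters, hval hd]
        ring
      · have hv : pvValue (c :: cs) = pvValue cs := by
          have h0 : pvStepB 0 c = 0 := by simp [pvStepB, hd]
          simp [pvValue, List.foldl_cons, h0]
        simp [pvStepA, ha, hd, pvLetters, hv]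

-- A's indexed countdown loop equals the foldr over the characters
lemma pv_portA_foldr (s : String) :
    get_numeronym_length s
      = (s.toList.foldr (fun c st => pvStepA st c) ((0 : Int), (0 : Nat))).1 := by
  unfold get_numeronym_length
  have hrange : PySem.List.pyRange (PySem.Str.len s - 1) (-1) (-1)
      = (PySem.List.pyRange 0 ((s.toList.length : Int)) 1).reverse := by
    rw [PySem.List.pyRange_neg_one_eq_reverse]
    norm_num
  rw [hrange]
  have hcong := PySem.List.foldl_congr_mem
    ((PySem.List.pyRange 0 ((s.toList.length : Int)) 1).reverse)
    (fun (st : Int × Nat) x =>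
      match PySem.Str.pyGet? s x with
      | some c =>
        if PySem.Chars.isalpha c then (st.1 + 1, st.2)
        else if PySem.Chars.isdigit c then
          (st.1 + (PySem.Int.ofChars? [c]).getD 0 * 10 ^ st.2, st.2 + 1)
        else st
      | none => st)
    (fun (st : Int × Nat) x => pvStepA st (PySem.List.pyGetD s.toList x ' '))
    ((0 : Int), (0 : Nat))
    (by
      intro st x hx
      rw [List.mem_reverse, PySem.List.mem_pyRange_one] at hx
      have hlt : x.toNat < s.toList.length := by omega
      have hsome : PySem.List.pyGet? s.toList x = some (s.toList[x.toNat]'hlt) :=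
        PySem.List.pyGet?_eq_some_getElem s.toList (by omega) (by exact_mod_cast hx.2)
      have hget : PySem.Str.pyGet? s x = some (s.toList[x.toNat]'hlt) := by
        simp only [PySem.Str.pyGet?_eq]; exact hsome
      have hgetD : PySem.List.pyGetD s.toList x ' ' = s.toList[x.toNat]'hlt := by
        simp [PySem.List.pyGetD, hsome]
      simp only [hget, hgetD, pvStepA])
  rw [hcong, List.foldl_reverse]
  conv_rhs => rw [← PySem.List.map_pyGetD_pyRange_zero' s.toList ' ']
  rw [List.foldr_map]

lemma pv_portB_eq (s : String) :
    get_numeronym_length_alt s = pvLetters s.toList + pvValue s.toList := rfl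

-- ===== VERDICT (by name: the statement is the Claim_ definition above) =====
theorem get_numeronym_length_spec : Claim_equal_get_numeronym_length := by
  intro s _
  show get_numeronym_length s = get_numeronym_length_alt s
  rw [pv_portA_foldr, pv_foldr_stepA, pv_portB_eq]
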